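-- pv_equiv track=rewrite | github.com/AbbyDabby246/Link_Noise | individualSimuls/ToggleSwitch/toggle_switch_gen.py | check_thresh
-- ===== SOURCE A (Python) =====
-- def check_thresh(l,thr,temp = 0):
--     if temp:
--         c = [n > thr for n in l[50000:]]
--     else:
--         c = [n < thr for n in l[50000:]]
--
--     if sum(c) > 0:
--         return c.index(1)
--     return -1
-- ===== SOURCE B (Python) =====
-- def check_thresh(l, thr, temp=0):
--     for i, n in enumerate(l[50000:]):
--         if (n > thr) if temp else (n < thr):
--             return i
--     return -1
-- ===== Notes on version B (the rewrite author's own statement) =====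
-- stated objective: faster
-- what changed: Replaces three passes over the slice (build a boolean list, sum it, then .index(1)) by a single early-exit enumerate scan returning the first slice-relative index that meets the threshold.
import Mathlib
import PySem

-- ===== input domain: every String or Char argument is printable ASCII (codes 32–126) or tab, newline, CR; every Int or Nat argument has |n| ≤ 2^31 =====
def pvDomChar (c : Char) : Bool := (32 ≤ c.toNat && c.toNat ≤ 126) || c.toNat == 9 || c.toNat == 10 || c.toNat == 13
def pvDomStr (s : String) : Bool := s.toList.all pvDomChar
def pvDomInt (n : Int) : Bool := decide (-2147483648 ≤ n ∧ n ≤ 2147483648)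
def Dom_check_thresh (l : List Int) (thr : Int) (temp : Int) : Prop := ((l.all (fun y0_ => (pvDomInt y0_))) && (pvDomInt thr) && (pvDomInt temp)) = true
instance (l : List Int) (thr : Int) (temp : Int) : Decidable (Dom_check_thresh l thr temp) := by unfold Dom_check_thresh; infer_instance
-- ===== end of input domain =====

-- B replaces A's three passes (boolean list, sum, .index(1)) by one early-exit scan; objective: faster (constant factor).

-- ===== PORT A =====
-- c = [n > thr for n in l[50000:]] / [n < thr ...]; if sum(c) > 0: return c.index(1); return -1
def check_thresh (l : List Int) (thr : Int) (temp : Int) : Int :=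
  let c : List Bool :=
    if temp ≠ 0 then (PySem.List.slice l (some 50000) none).map (fun n => decide (n > thr))
    else (PySem.List.slice l (some 50000) none).map (fun n => decide (n < thr))
  if (c.map (fun b => if b then (1 : Int) else 0)).sum > 0 then
    match PySem.List.index? c true with
    | some k => (k : Int)
    | none => -1   -- unreachable: the sum guard ensures true ∈ c
  else -1

-- ===== PORT B =====
-- for i, n in enumerate(l[50000:]): if (n > thr) if temp else (n < thr): return i; return -1
def chkLoop (thr : Int) (temp : Int) : List Int → Int → Int
  | [], _ => -1
  | n :: rest, i =>
    if (if temp ≠ 0 then decide (n > thr) else decide (n < thr)) then i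
    else chkLoop thr temp rest (i + 1)

def check_thresh_alt (l : List Int) (thr : Int) (temp : Int) : Int :=
  chkLoop thr temp (PySem.List.slice l (some 50000) none) 0

-- ===== PRECONDITION & SPEC =====
def Spec_check_thresh (l : List Int) (thr : Int) (temp : Int) (out : Int) : Prop := out = check_thresh_alt l thr temp
instance (l : List Int) (thr : Int) (temp : Int) (out : Int) : Decidable (Spec_check_thresh l thr temp out) := by unfold Spec_check_thresh; infer_instance

-- ===== CLAIM (what is proved, stated in full; the proofs are below) =====
def Claim_equal_check_thresh : Prop := ∀ (l : List Int) (thr : Int) (temp : Int), Dom_check_thresh l thr temp → Spec_check_thresh l thr temp (check_thresh l thr temp)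

-- ===== LEMMAS AND PROOFS =====

-- the 0/1 sum over a boolean list is nonnegative
lemma sum01_nonneg (c : List Bool) : 0 ≤ (c.map (fun b => if b then (1 : Int) else 0)).sum := by
  induction c with
  | nil => simp
  | cons b c ih => cases b <;> simp <;> omega

-- the 0/1 sum over a boolean list is positive iff some entry is true
lemma sum_pos_iff_mem_true (c : List Bool) :
    ((c.map (fun b => if b then (1 : Int) else 0)).sum > 0) ↔ true ∈ c := by
  induction c with
  | nil => simp
  | cons b c ih =>
    cases b
    · simpa using ih
    · have := sum01_nonneg c
      simp
      omega

-- first index of `true` in `m.map p` is the first index where p holds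
lemma index?_map_eq_findIdx? (p : Int → Bool) (m : List Int) :
    PySem.List.index? (m.map p) true = m.findIdx? p := by
  induction m with
  | nil => simp [PySem.List.index?]
  | cons a m ih =>
    rw [List.map_cons]
    by_cases h : p a = true
    · rw [h, PySem.List.index?_cons_self, List.findIdx?_cons]
      simp [h]
    · rw [Bool.not_eq_true] at h
      rw [h]
      rw [PySem.List.index?_cons_of_ne]
      · rw [ih, List.findIdx?_cons]
        simp [h]
      · decide

-- A's body, characterised through findIdx?
lemma a_body_eq (p : Int → Bool) (m : List Int) :
    (if ((m.map p).map (fun b => if b then (1 : Int) else 0)).sum > 0 then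
       match PySem.List.index? (m.map p) true with
       | some k => (k : Int)
       | none => -1
     else -1)
    = match m.findIdx? p with | some k => (k : Int) | none => -1 := by
  rw [index?_map_eq_findIdx?]
  cases h : m.findIdx? p with
  | none =>
    have hnm : true ∉ m.map p := by
      rw [List.findIdx?_eq_none_iff] at h
      intro hmem
      obtain ⟨x, hx, hpx⟩ := List.mem_map.mp hmem
      simp [h x hx] at hpx
    rw [if_neg ((sum_pos_iff_mem_true (m.map p)).not.mpr hnm)]
  | some k =>
    have hm : true ∈ m.map p := by
      obtain ⟨hk, hp, _⟩ := List.findIdx?_eq_some_iff_getElem.mp h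
      exact List.mem_map.mpr ⟨m[k], List.getElem_mem hk, hp⟩
    rw [if_pos ((sum_pos_iff_mem_true (m.map p)).mpr hm)]

-- B's loop, characterised through findIdx?
lemma chkLoop_eq (thr temp : Int) (m : List Int) (i : Int) :
    chkLoop thr temp m i
      = match m.findIdx? (fun n => if temp ≠ 0 then decide (n > thr) else decide (n < thr)) with
        | some k => i + (k : Int)
        | none => -1 := by
  induction m generalizing i with
  | nil => simp [chkLoop]
  | cons n m ih =>
    rw [chkLoop, List.findIdx?_cons]
    cases hb : (if temp ≠ 0 then decide (n > thr) else decide (n < thr)) with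
    | true => simp
    | false =>
      simp only [Bool.false_eq_true, if_false, ih]
      cases hf : m.findIdx? (fun n => if temp ≠ 0 then decide (n > thr) else decide (n < thr)) with
      | none => simp
      | some k => simp; ring

-- ===== VERDICT (by name: the statement is the Claim_ definition above) =====
theorem check_thresh_spec : Claim_equal_check_thresh := by
  intro l thr temp _
  unfold Spec_check_thresh check_thresh check_thresh_alt
  rw [chkLoop_eq]
  by_cases h : temp = 0
  · subst h
    simp only [ne_eq, not_true_eq_false, if_false]
    rw [a_body_eq (fun n => decide (n < thr))]
    cases hf : (PySem.List.slice l (some 50000) none).findIdx? (fun n => decide (n < thr)) <;>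
      simp
  · simp only [ne_eq, h, not_false_eq_true, if_true]
    rw [a_body_eq (fun n => decide (n > thr))]
    cases hf : (PySem.List.slice l (some 50000) none).findIdx? (fun n => decide (n > thr)) <;>
      simp
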